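-- pv_equiv track=rewrite | github.com/BamlakT/Algo-courses-in-Epita-S1-2021 | s1-python-main/strings/td3_string.py | div11_pal_str
-- ===== SOURCE A (Python) =====
-- def div11_pal_str(s):
--     '''
--     s: string representing an integer
--     tests whether the number s is divisible by 11
--     '''
--     n = len(s)
--     if n%2 == 1:
--         return False
--     else:
--         i = 0
--         while i < n//2 and s[i] == s[n-i-1]:
--             i = i+1
--         return i == n//2
-- ===== SOURCE B (Python) =====
-- def div11_pal_str(s):
--     return len(s) % 2 == 0 and s == s[::-1]
-- ===== Notes on version B (the rewrite author's own statement) =====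
-- stated objective: simpler
-- what changed: Replaces the two-pointer while loop with an early exit by a closed-form check: even length test plus one whole-string reverse-and-compare.
import Mathlib
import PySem

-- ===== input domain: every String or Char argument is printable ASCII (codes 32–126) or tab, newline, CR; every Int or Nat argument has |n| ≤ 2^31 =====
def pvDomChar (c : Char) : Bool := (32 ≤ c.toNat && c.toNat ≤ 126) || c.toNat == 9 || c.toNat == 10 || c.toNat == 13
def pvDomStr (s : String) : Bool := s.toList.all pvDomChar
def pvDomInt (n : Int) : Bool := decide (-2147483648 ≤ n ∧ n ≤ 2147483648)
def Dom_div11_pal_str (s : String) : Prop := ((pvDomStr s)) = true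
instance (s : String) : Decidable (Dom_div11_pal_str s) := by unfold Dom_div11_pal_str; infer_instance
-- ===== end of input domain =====

-- B replaces A's inward two-pointer loop by a closed-form even-length test plus
-- whole-string reverse-and-compare (objective: simpler).

-- ===== PORT A =====
-- the 'while i < n//2 and s[i] == s[n-i-1]' loop; returns the final i
def div11Loop (l : List Char) (n : Nat) (i : Nat) : Nat :=
  if h : i < n / 2 ∧ l[i]? = l[n - i - 1]? then
    div11Loop l n (i + 1)
  else
    i
termination_by n / 2 - i
decreasing_by omega

def div11_pal_str (s : String) : Bool :=
  let l := s.toList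
  let n := l.length
  if n % 2 == 1 then
    false
  else
    div11Loop l n 0 == n / 2

-- ===== PORT B =====
-- 'len(s) % 2 == 0 and s == s[::-1]'; s[::-1] is s.toList.reverse (PySem.Str.slice?_none_none_neg_one)
def div11_pal_str_alt (s : String) : Bool :=
  (s.toList.length % 2 == 0) && (s.toList == s.toList.reverse)

-- ===== PRECONDITION & SPEC =====
def Spec_div11_pal_str (s : String) (out : Bool) : Prop := out = div11_pal_str_alt s
instance (s : String) (out : Bool) : Decidable (Spec_div11_pal_str s out) := by unfold Spec_div11_pal_str; infer_instance

-- ===== CLAIM (what is proved, stated in full; the proofs are below) =====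
def Claim_equal_div11_pal_str : Prop := ∀ (s : String), Dom_div11_pal_str s → Spec_div11_pal_str s (div11_pal_str s)

-- ===== LEMMAS AND PROOFS =====

-- the loop reaches n/2 iff every remaining pair of mirrored characters matches
theorem div11Loop_eq_iff (l : List Char) (n i : Nat) (hi : i ≤ n / 2) :
    div11Loop l n i = n / 2 ↔ ∀ j, i ≤ j → j < n / 2 → l[j]? = l[n - j - 1]? := by
  induction i using div11Loop.induct (l := l) (n := n) with
  | case1 i h ih =>
      rw [div11Loop, dif_pos h]
      rw [ih (by omega)]
      constructor
      · intro hall j hj1 hj2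
        rcases Nat.eq_or_lt_of_le hj1 with rfl | hlt
        · exact h.2
        · exact hall j hlt hj2
      · intro hall j hj1 hj2
        exact hall j (by omega) hj2
  | case2 i h =>
      rw [div11Loop, dif_neg h]
      push Not at h
      constructor
      · intro he j hj1 hj2
        omega
      · intro hall
        by_contra hne
        have hi2 : i < n / 2 := by omega
        exact h hi2 (hall i le_rfl hi2)

-- mirrored first-half equality characterises l = l.reverse
theorem pal_iff (l : List Char) :
    (∀ j, j < l.length / 2 → l[j]? = l[l.length - j - 1]?) ↔ l = l.reverse := by
  constructor
  · intro h
    apply List.ext_getElem?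
    intro j
    by_cases hj : j < l.length
    · rw [List.getElem?_reverse hj]
      by_cases hhalf : j < l.length / 2
      · have := h j hhalf
        have he : l.length - 1 - j = l.length - j - 1 := by omega
        rw [he]; exact this
      · by_cases hk : l.length - 1 - j < l.length / 2
        · have h2 := h (l.length - 1 - j) hk
          have he : l.length - (l.length - 1 - j) - 1 = j := by omega
          rw [he] at h2
          exact h2.symm
        · have he : l.length - 1 - j = j := by omega
          rw [he]
    · rw [List.getElem?_eq_none (by omega), List.getElem?_eq_none (by simp; omega)]
  · intro h j hj
    nth_rewrite 1 [h]
    rw [List.getElem?_reverse (by omega)]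
    congr 1
    omega

-- ===== VERDICT (by name: the statement is the Claim_ definition above) =====
theorem div11_pal_str_spec : Claim_equal_div11_pal_str := by
  intro s _
  unfold Spec_div11_pal_str div11_pal_str div11_pal_str_alt
  set l := s.toList with hl
  by_cases hodd : l.length % 2 = 1
  · rw [if_pos (by simpa using hodd)]
    have : l.length % 2 ≠ 0 := by omega
    simp [this]
  · rw [if_neg (by simpa using hodd)]
    have heven : l.length % 2 = 0 := by omega
    have hiff := div11Loop_eq_iff l l.length 0 (Nat.zero_le _)
    simp only [Nat.zero_le, true_implies] at hiff
    rw [Bool.eq_iff_iff]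
    simp only [beq_iff_eq, Bool.and_eq_true, heven]
    rw [hiff, ← pal_iff l]
    constructor
    · intro hall
      exact ⟨trivial, hall⟩
    · intro ⟨_, hall⟩
      exact hall
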